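-- pv_equiv track=rewrite | github.com/lmasz/PTStudy | Cryptology/crypto_utils.py | calc_ys
-- ===== SOURCE A (Python) =====
-- def calc_ys(k, text):
--   y1 = ""
--   y2 = ""
--   y3 = ""
--   y4 = ""
--   y5 = ""
--   y6 = ""
--   y7 = ""
--   for index in range(len(text)):
--     if index % k == 0:
--       y1 += text[index]
--     elif index % k == 1:
--       y2 += text[index]
--     elif index % k == 2:
--       y3 += text[index]
--     elif index % k == 3:
--       y4 += text[index]
--     elif index % k == 4:
--       y5 += text[index]
--     elif index % k == 5:
--       y6 += text[index]
--     elif index % k == 6: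
--       y7 += text[index]
--
--   return [y1,y2,y3,y4,y5,y6,y7]
-- ===== SOURCE B (Python) =====
-- def calc_ys(k, text):
--   return [''.join(c for i, c in enumerate(text) if i % k == r) for r in range(7)]
-- ===== Notes on version B (the rewrite author's own statement) =====
-- stated objective: idiomatic
-- what changed: Replaces A's single dispatching pass over the text with seven boolean accumulators by one comprehension that, for each residue r in range(7), filters-and-joins the characters whose index satisfies i % k == r.
-- outside the precondition, e.g. on calc_ys(0, 'ab'): A raises ZeroDivisionError, B raises ZeroDivisionError
import Mathlib
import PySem

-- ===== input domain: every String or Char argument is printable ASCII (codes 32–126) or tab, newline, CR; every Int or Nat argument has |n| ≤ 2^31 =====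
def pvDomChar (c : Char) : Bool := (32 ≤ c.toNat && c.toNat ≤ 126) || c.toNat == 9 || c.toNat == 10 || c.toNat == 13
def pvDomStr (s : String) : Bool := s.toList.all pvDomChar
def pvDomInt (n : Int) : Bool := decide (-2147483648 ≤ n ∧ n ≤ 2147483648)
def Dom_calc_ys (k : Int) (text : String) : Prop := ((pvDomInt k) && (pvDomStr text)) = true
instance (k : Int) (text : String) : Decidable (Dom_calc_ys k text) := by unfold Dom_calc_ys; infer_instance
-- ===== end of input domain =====

-- B replaces A's single dispatching pass (seven named accumulators + if/elif chain) by one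
-- comprehension that filters-and-joins the characters of each residue class r in range(7).

-- ===== PORT A =====
-- the loop body: the seven accumulators y1..y7 as a nested product, same if/elif chain
def calcStep (k : Int) (cs : List Char)
    (y : String × String × String × String × String × String × String) (index : Nat) :
    String × String × String × String × String × String × String :=
  let c := cs.getD index ' '
  let m := PySem.Int.mod (index : Int) k
  if m == 0 then (y.1.push c, y.2.1, y.2.2.1, y.2.2.2.1, y.2.2.2.2.1, y.2.2.2.2.2.1, y.2.2.2.2.2.2)
  else if m == 1 then (y.1, y.2.1.push c, y.2.2.1, y.2.2.2.1, y.2.2.2.2.1, y.2.2.2.2.2.1, y.2.2.2.2.2.2)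
  else if m == 2 then (y.1, y.2.1, y.2.2.1.push c, y.2.2.2.1, y.2.2.2.2.1, y.2.2.2.2.2.1, y.2.2.2.2.2.2)
  else if m == 3 then (y.1, y.2.1, y.2.2.1, y.2.2.2.1.push c, y.2.2.2.2.1, y.2.2.2.2.2.1, y.2.2.2.2.2.2)
  else if m == 4 then (y.1, y.2.1, y.2.2.1, y.2.2.2.1, y.2.2.2.2.1.push c, y.2.2.2.2.2.1, y.2.2.2.2.2.2)
  else if m == 5 then (y.1, y.2.1, y.2.2.1, y.2.2.2.1, y.2.2.2.2.1, y.2.2.2.2.2.1.push c, y.2.2.2.2.2.2)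
  else if m == 6 then (y.1, y.2.1, y.2.2.1, y.2.2.2.1, y.2.2.2.2.1, y.2.2.2.2.2.1, y.2.2.2.2.2.2.push c)
  else y

def calc_ys (k : Int) (text : String) : List String :=
  let st := (List.range text.toList.length).foldl (calcStep k text.toList) ("", "", "", "", "", "", "")
  [st.1, st.2.1, st.2.2.1, st.2.2.2.1, st.2.2.2.2.1, st.2.2.2.2.2.1, st.2.2.2.2.2.2]

-- ===== PORT B =====
def calc_ys_alt (k : Int) (text : String) : List String :=
  (List.range 7).map (fun (r : Nat) =>
    String.mk (((PySem.List.enumerate text.toList).filter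
      (fun p => PySem.Int.mod p.1 k == (r : Int))).map Prod.snd))

-- ===== PRECONDITION & SPEC =====
-- Pre_ excludes exactly the inputs where both Pythons raise ZeroDivisionError: k = 0 with nonempty text.
def Pre_calc_ys (k : Int) (text : String) : Prop := text = "" ∨ k ≠ 0
instance (k : Int) (text : String) : Decidable (Pre_calc_ys k text) := by unfold Pre_calc_ys; infer_instance
def pvWitness_calc_ys : Int × String := (3, "abcdefgh")

def Spec_calc_ys (k : Int) (text : String) (out : List String) : Prop := out = calc_ys_alt k text
instance (k : Int) (text : String) (out : List String) : Decidable (Spec_calc_ys k text out) := by unfold Spec_calc_ys; infer_instance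

-- ===== CLAIM (what is proved, stated in full; the proofs are below) =====
def Claim_equal_calc_ys : Prop := ∀ (k : Int) (text : String), Dom_calc_ys k text → Pre_calc_ys k text → Spec_calc_ys k text (calc_ys k text)

-- ===== LEMMAS AND PROOFS =====
def pvBucket (k : Int) (cs : List Char) (r : Int) : String :=
  String.mk (((PySem.List.enumerate cs).filter (fun p => PySem.Int.mod p.1 k == r)).map Prod.snd)

theorem pv_main (k : Int) (cs : List Char) :
    (List.range cs.length).foldl (calcStep k cs) ("", "", "", "", "", "", "")
    = (pvBucket k cs 0, pvBucket k cs 1, pvBucket k cs 2, pvBucket k cs 3,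
       pvBucket k cs 4, pvBucket k cs 5, pvBucket k cs 6) := by
  induction cs using List.reverseRecOn with
  | nil =>
    simp only [List.length_nil, List.range_zero, List.foldl_nil, pvBucket, PySem.List.enumerate_nil,
      List.filter_nil, List.map_nil]
    rfl
  | append_singleton ds c ih =>
    have hcong : ∀ y (i : Nat), i ∈ List.range ds.length →
        calcStep k (ds ++ [c]) y i = calcStep k ds y i := by
      intro y i hi
      have hlt : i < ds.length := List.mem_range.mp hi
      simp [calcStep, List.getD, List.getElem?_append_left hlt]
    have hfold : (List.range (ds ++ [c]).length).foldl (calcStep k (ds ++ [c])) ("", "", "", "", "", "", "")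
        = calcStep k (ds ++ [c]) ((List.range ds.length).foldl (calcStep k ds) ("", "", "", "", "", "", "")) ds.length := by
      rw [List.length_append, List.length_singleton, List.range_succ, List.foldl_append,
        List.foldl_ext (H := hcong)]
      simp
    rw [hfold, ih]
    have hbucket : ∀ r : Int, pvBucket k (ds ++ [c]) r =
        if PySem.Int.mod (ds.length : Int) k == r
        then (pvBucket k ds r).push c else pvBucket k ds r := by
      intro r
      simp only [pvBucket, PySem.List.enumerate_append, List.filter_append, List.map_append]
      by_cases h : PySem.Int.mod (ds.length : Int) k == r
      · simp [PySem.List.enumerate, h, String.push, String.mk]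
      · simp [PySem.List.enumerate, h]
    have hget : (ds ++ [c]).getD ds.length ' ' = c := by
      simp
    simp only [hbucket]
    by_cases h0 : PySem.Int.mod (ds.length : Int) k = 0
    · simp [calcStep, h0]
    · by_cases h1 : PySem.Int.mod (ds.length : Int) k = 1
      · simp [calcStep, h1]
      · by_cases h2 : PySem.Int.mod (ds.length : Int) k = 2
        · simp [calcStep, h2]
        · by_cases h3 : PySem.Int.mod (ds.length : Int) k = 3
          · simp [calcStep, h3]
          · by_cases h4 : PySem.Int.mod (ds.length : Int) k = 4
            · simp [calcStep, h4]
            · by_cases h5 : PySem.Int.mod (ds.length : Int) k = 5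
              · simp [calcStep, h5]
              · by_cases h6 : PySem.Int.mod (ds.length : Int) k = 6
                · simp [calcStep, h6]
                · simp [calcStep, h0, h1, h2, h3, h4, h5, h6]

-- ===== VERDICT (by name: the statement is the Claim_ definition above) =====
theorem calc_ys_spec : Claim_equal_calc_ys := by
  intro k text _ _
  unfold Spec_calc_ys calc_ys calc_ys_alt
  rw [pv_main]
  simp [List.range_succ, pvBucket]
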